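-- pv_equiv track=rewrite | github.com/AngelesT85/PygameBattleShip | functions.py | change_coords
-- ===== SOURCE A (Python) =====
-- def change_coords(x, y, first_x, first_y):
--     count = 0
--     new_x, new_y = 0, 0
--
--     for i in range(10):
--         num = first_x + (32 * i)
--         if num <= x < num + 32:
--             new_x = i
--             count += 1
--             break
--
--     for j in range(10):
--         num = first_y + (32 * j)
--         if num <= y < num + 32:
--             new_y = j
--             count += 1
--             break
--
--     if count == 2:
--         return True, new_x, new_y
--     else:
--         return False, new_x, new_y
-- ===== SOURCE B (Python) =====
-- def change_coords(x, y, first_x, first_y):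
--     found_x = first_x <= x < first_x + 320
--     found_y = first_y <= y < first_y + 320
--     new_x = int((x - first_x) // 32) if found_x else 0
--     new_y = int((y - first_y) // 32) if found_y else 0
--     return (found_x and found_y, new_x, new_y)
-- ===== Notes on version B (the rewrite author's own statement) =====
-- stated objective: simpler
-- what changed: Replaces the two 10-iteration linear scans with closed-form floor-division indices and two half-open range tests; no loops remain.
import Mathlib
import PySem

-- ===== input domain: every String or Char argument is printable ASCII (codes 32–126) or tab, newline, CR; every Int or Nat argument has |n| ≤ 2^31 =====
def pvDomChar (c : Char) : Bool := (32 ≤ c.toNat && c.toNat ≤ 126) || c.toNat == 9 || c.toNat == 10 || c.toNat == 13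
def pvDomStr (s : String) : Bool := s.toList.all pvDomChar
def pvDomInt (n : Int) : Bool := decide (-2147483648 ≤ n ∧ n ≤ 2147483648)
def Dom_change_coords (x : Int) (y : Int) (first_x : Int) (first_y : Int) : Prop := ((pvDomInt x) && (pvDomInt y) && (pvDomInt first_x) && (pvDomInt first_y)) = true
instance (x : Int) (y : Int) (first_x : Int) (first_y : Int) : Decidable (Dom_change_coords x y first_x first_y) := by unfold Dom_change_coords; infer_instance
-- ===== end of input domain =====

-- ===== PORT A =====
-- B replaces the two 10-iteration scans with closed-form floor-division indices (objective: simpler).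
-- break-terminated scan of A's first/second loop: returns (new, count-increment)
def pvScanA (v first : Int) : List Int → Int × Int
  | [] => (0, 0)
  | i :: rest =>
    let num := first + 32 * i
    if num ≤ v ∧ v < num + 32 then (i, 1) else pvScanA v first rest

def change_coords (x : Int) (y : Int) (first_x : Int) (first_y : Int) : Bool × Int × Int :=
  let rx := pvScanA x first_x (PySem.List.pyRange 0 10 1)
  let ry := pvScanA y first_y (PySem.List.pyRange 0 10 1)
  let count := rx.2 + ry.2
  if count = 2 then (true, rx.1, ry.1) else (false, rx.1, ry.1)

-- ===== PORT B =====
def change_coords_alt (x : Int) (y : Int) (first_x : Int) (first_y : Int) : Bool × Int × Int :=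
  let found_x := first_x ≤ x ∧ x < first_x + 320
  let found_y := first_y ≤ y ∧ y < first_y + 320
  let new_x := if found_x then PySem.Int.floordiv (x - first_x) 32 else 0
  let new_y := if found_y then PySem.Int.floordiv (y - first_y) 32 else 0
  (decide (found_x ∧ found_y), new_x, new_y)

-- ===== PRECONDITION & SPEC =====
def Spec_change_coords (x : Int) (y : Int) (first_x : Int) (first_y : Int) (out : Bool × Int × Int) : Prop := out = change_coords_alt x y first_x first_y
instance (x : Int) (y : Int) (first_x : Int) (first_y : Int) (out : Bool × Int × Int) : Decidable (Spec_change_coords x y first_x first_y out) := by unfold Spec_change_coords; infer_instance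

-- ===== CLAIM (what is proved, stated in full; the proofs are below) =====
def Claim_equal_change_coords : Prop := ∀ (x : Int) (y : Int) (first_x : Int) (first_y : Int), Dom_change_coords x y first_x first_y → Spec_change_coords x y first_x first_y (change_coords x y first_x first_y)

-- ===== LEMMAS AND PROOFS =====

-- ===== VERDICT (by name: the statement is the Claim_ definition above) =====
theorem pvScanA_eq (v first : Int) :
    pvScanA v first (PySem.List.pyRange 0 10 1) =
      (if first ≤ v ∧ v < first + 320 then PySem.Int.floordiv (v - first) 32 else 0,
       if first ≤ v ∧ v < first + 320 then (1 : Int) else 0) := by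
  have h : PySem.List.pyRange 0 10 1 = [0,1,2,3,4,5,6,7,8,9] := by decide
  have hf : PySem.Int.floordiv (v - first) 32 = (v - first) / 32 :=
    PySem.Int.floordiv_eq_ediv_of_pos (by norm_num)
  rw [h, hf]
  simp only [pvScanA]
  split_ifs <;> (refine Prod.ext ?_ ?_) <;> simp only <;> omega

theorem change_coords_spec : Claim_equal_change_coords := by
  intro x y first_x first_y _
  unfold Spec_change_coords change_coords change_coords_alt
  rw [pvScanA_eq, pvScanA_eq]
  by_cases hx : first_x ≤ x ∧ x < first_x + 320 <;>
  by_cases hy : first_y ≤ y ∧ y < first_y + 320 <;>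
    simp [hx, hy]
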